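-- pv_equiv track=rewrite | github.com/javokhirbek1999/AlgorithmsDS | FAANG-Interview-Questions/Bloomberg/Welsh-Sort.py | solve
-- ===== SOURCE A (Python) =====
-- def solve(string):
--     alphabet = ['a','b','c','ch','dd','d','e', 'f', 'ff', 'g', 'ng', 'h', 'i', 'j', 'l', 'll', 'm', 'n', 'o', 'p', 'ph', 'r', 'rh', 's', 't', 'th', 'u', 'w', 'y']
--     alpha_index = {ch:index for index, ch in enumerate(alphabet)}
--
--     i = 0
--
--     res = []
--
--     while i < len(string)-1:
--
--         if string[i]+string[i+1] in alpha_index: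
--             res.append(alpha_index[string[i] + string[i+1]])
--             i += 2
--         else:
--             res.append(alpha_index[string[i]])
--             i += 1
--
--     if i < len(string):
--         res.append(alpha_index[string[-1]])
--
--
--     return tuple(res)
-- ===== SOURCE B (Python) =====
-- DIGRAPHS = {'ch', 'dd', 'ff', 'ng', 'll', 'ph', 'rh', 'th'}
-- ALPHABET = ['a','b','c','ch','dd','d','e','f','ff','g','ng','h','i','j','l','ll','m','n','o','p','ph','r','rh','s','t','th','u','w','y']
--
--
-- def solve(string):
--     # Greedily cut the string into tokens (digraph first, else one letter),
--     # then map each token to its alphabet position.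
--     tokens = []
--     s = string
--     while s:
--         k = 2 if s[:2] in DIGRAPHS else 1
--         tokens.append(s[:k])
--         s = s[k:]
--     return tuple(ALPHABET.index(t) for t in tokens)
-- ===== Notes on version B (the rewrite author's own statement) =====
-- stated objective: alternative
-- what changed: A walks the string with an index cursor, appending dict lookups as it goes; B first cuts the string into digraph/single-letter tokens by slicing off the front, then maps each token to its position with a digraph set and ALPHABET.index.
import Mathlib
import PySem

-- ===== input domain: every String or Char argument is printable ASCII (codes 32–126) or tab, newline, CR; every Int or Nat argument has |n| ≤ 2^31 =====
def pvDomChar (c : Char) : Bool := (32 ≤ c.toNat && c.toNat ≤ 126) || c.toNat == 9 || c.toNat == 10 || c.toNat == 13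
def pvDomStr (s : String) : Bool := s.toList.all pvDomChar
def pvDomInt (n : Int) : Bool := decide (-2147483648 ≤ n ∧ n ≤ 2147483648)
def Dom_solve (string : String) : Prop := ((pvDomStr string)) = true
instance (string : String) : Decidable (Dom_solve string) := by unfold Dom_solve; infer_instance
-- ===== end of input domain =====

-- B tokenizes the string first (digraph set + slices) and then maps tokens through ALPHABET.index,
-- instead of A's index-cursor loop with a char→index dict; same values, no speed claim.

-- ===== PORT A =====
def alphabetA : List (List Char) :=
  [['a'],['b'],['c'],['c','h'],['d','d'],['d'],['e'],['f'],['f','f'],['g'],['n','g'],['h'],['i'],['j'],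
   ['l'],['l','l'],['m'],['n'],['o'],['p'],['p','h'],['r'],['r','h'],['s'],['t'],['t','h'],['u'],['w'],['y']]

-- alpha_index = {ch: index for index, ch in enumerate(alphabet)}
def alphaIndexA : PySem.Dict (List Char) Int :=
  (PySem.List.enumerate alphabetA).foldl (fun d p => d.insert p.2 p.1) PySem.Dict.empty

-- the while-loop of A, with the trailing `if i < len(string)` in the exit branch
def solveLoopA (cs : List Char) (i : Nat) (res : List Int) : List Int :=
  if h : i + 1 < cs.length then
    let two := [cs[i], cs[i+1]]
    if alphaIndexA.contains two then
      solveLoopA cs (i+2) (res ++ [alphaIndexA.getD two 0])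
    else
      solveLoopA cs (i+1) (res ++ [alphaIndexA.getD [cs[i]] 0])
  else if i < cs.length then
    res ++ [alphaIndexA.getD [PySem.List.pyGetD cs (-1) 'a'] 0]  -- string[-1]
  else res
termination_by cs.length - i

def solve (string : String) : List Int := solveLoopA string.toList 0 []

-- ===== PORT B =====
def digraphsB : List (List Char) :=
  [['c','h'],['d','d'],['f','f'],['n','g'],['l','l'],['p','h'],['r','h'],['t','h']]

-- B's ALPHABET is the same literal as A's alphabet; reuse the constant
def alphabetB : List (List Char) := alphabetA

-- while s: k = 2 if s[:2] in DIGRAPHS else 1; tokens.append(s[:k]); s = s[k:]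
def tokenizeB (s : List Char) : List (List Char) :=
  if h : s = [] then []
  else if s.take 2 ∈ digraphsB then s.take 2 :: tokenizeB (s.drop 2)
  else s.take 1 :: tokenizeB (s.drop 1)
termination_by s.length
decreasing_by
  all_goals
    simp only [List.length_drop]
    have : 0 < s.length := List.length_pos_iff.mpr h
    omega

-- ALPHABET.index(t)
def indexB (t : List Char) : Int := (((PySem.List.index? alphabetB t).getD 0 : Nat) : Int)

def solve_alt (string : String) : List Int := (tokenizeB string.toList).map indexB

-- ===== PRECONDITION & SPEC =====
def validSingles : List Char :=
  ['a','b','c','d','e','f','g','h','i','j','l','m','n','o','p','r','s','t','u','w','y']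

-- Pre_ excludes exactly the strings containing a character that is not a Welsh letter:
-- A raises KeyError on them (B raises ValueError).
def Pre_solve (string : String) : Prop := string.toList.all (fun c => validSingles.contains c) = true
instance (string : String) : Decidable (Pre_solve string) := by unfold Pre_solve; infer_instance

def pvWitness_solve : String := "llan"

def Spec_solve (string : String) (out : List Int) : Prop := out = solve_alt string
instance (string : String) (out : List Int) : Decidable (Spec_solve string out) := by unfold Spec_solve; infer_instance

-- ===== CLAIM (what is proved, stated in full; the proofs are below) =====
def Claim_equal_solve : Prop := ∀ (string : String), Dom_solve string → Pre_solve string → Spec_solve string (solve string)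

-- ===== LEMMAS AND PROOFS =====

-- alpha_index's keys are exactly the alphabet entries (the dict is built by fresh inserts)
set_option maxRecDepth 2000 in
lemma keysA : alphaIndexA.keys = alphabetA := by decide

-- A's digraph test `s[i]+s[i+1] in alpha_index` is key membership
lemma containsA (t : List Char) : alphaIndexA.contains t = decide (t ∈ alphabetA) := by
  rw [PySem.Dict.contains_eq_decide_mem_keys, keysA]

-- a two-character token is an alphabet entry iff it is a digraph
lemma mem_pair (c1 c2 : Char) : [c1, c2] ∈ alphabetA ↔ [c1, c2] ∈ digraphsB := by
  simp [alphabetA, digraphsB]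

-- on a digraph, A's dict lookup equals B's ALPHABET.index
set_option maxRecDepth 2000 in
lemma lookup_digraph : ∀ t ∈ digraphsB, alphaIndexA.getD t 0 = indexB t := by
  intro t ht; fin_cases ht <;> decide

-- on a valid single letter, A's dict lookup equals B's ALPHABET.index
set_option maxRecDepth 2000 in
lemma lookup_single : ∀ c ∈ validSingles, alphaIndexA.getD [c] 0 = indexB [c] := by
  intro c hc; fin_cases hc <;> decide

lemma digraph_len : ∀ t ∈ digraphsB, t.length = 2 := by decide

lemma tokenizeB_nil : tokenizeB [] = [] := by rw [tokenizeB]; rfl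

lemma drop_last_eq (cs : List Char) (i : Nat) (hi : i + 1 = cs.length) :
    cs.drop i = [cs[i]] := by
  have h1 : cs.drop i = cs[i] :: cs.drop (i + 1) := List.drop_eq_getElem_cons (by omega)
  rw [h1, hi, List.drop_length]

lemma loop_eq_tokens (cs : List Char) (hv : ∀ c ∈ cs, c ∈ validSingles) :
    ∀ i res, solveLoopA cs i res = res ++ (tokenizeB (cs.drop i)).map indexB := by
  suffices H : ∀ n i res, cs.length - i ≤ n →
      solveLoopA cs i res = res ++ (tokenizeB (cs.drop i)).map indexB by
    intro i res; exact H cs.length i res (by omega)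
  intro n
  induction n with
  | zero =>
    intro i res hle
    have h2 : ¬ i < cs.length := by omega
    rw [solveLoopA, dif_neg (by omega), if_neg h2,
        List.drop_of_length_le (by omega), tokenizeB_nil]
    simp
  | succ n ihn =>
    intro i res hle
    rw [solveLoopA]
    by_cases h : i + 1 < cs.length
    · have hc1 : cs[i] ∈ validSingles := hv _ (List.getElem_mem _)
      have hdrop : cs.drop i = cs[i] :: cs[i+1] :: cs.drop (i+2) := by
        rw [List.drop_eq_getElem_cons (by omega : i < cs.length),
            List.drop_eq_getElem_cons (by omega : i + 1 < cs.length)]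
      have hne' : cs.drop i ≠ [] := by rw [hdrop]; exact List.cons_ne_nil _ _
      have htake2 : (cs.drop i).take 2 = [cs[i], cs[i+1]] := by rw [hdrop]; rfl
      have htake1 : (cs.drop i).take 1 = [cs[i]] := by rw [hdrop]; rfl
      have hdrop2 : (cs.drop i).drop 2 = cs.drop (i+2) := by
        rw [hdrop, List.drop_succ_cons, List.drop_succ_cons, List.drop_zero]
      have hdrop1 : (cs.drop i).drop 1 = cs.drop (i+1) := by
        rw [hdrop, List.drop_succ_cons, List.drop_zero]
        exact (List.drop_eq_getElem_cons h).symm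
      simp only [dif_pos h]
      rw [containsA, tokenizeB, dif_neg hne', htake2]
      by_cases hd : [cs[i], cs[i+1]] ∈ digraphsB
      · rw [if_pos (by simpa [mem_pair] using hd), if_pos hd,
            ihn (i+2) _ (by omega), hdrop2, List.map_cons,
            lookup_digraph _ hd, List.append_assoc]
        rfl
      · rw [if_neg (by simpa [mem_pair] using hd), if_neg hd,
            ihn (i+1) _ (by omega), htake1, hdrop1, List.map_cons,
            lookup_single _ hc1, List.append_assoc]
        rfl
    · by_cases h2 : i < cs.length
      · have hi : i + 1 = cs.length := by omega
        have hne : cs ≠ [] := by intro hh; simp [hh] at h2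
        have hsingle : cs[i] ∈ validSingles := hv _ (List.getElem_mem _)
        have hnd : ([cs[i]] : List Char) ∉ digraphsB := by
          intro hmem; simpa using digraph_len _ hmem
        have hlast : PySem.List.pyGetD cs (-1) 'a' = cs[i] := by
          rw [PySem.List.pyGetD_neg_one cs 'a' hne, List.getLast_eq_getElem]
          congr 1; omega
        rw [dif_neg h, if_pos h2, drop_last_eq cs i hi, tokenizeB,
            dif_neg (List.cons_ne_nil _ _)]
        have ht2 : ([cs[i]] : List Char).take 2 = [cs[i]] := rfl
        have ht1 : ([cs[i]] : List Char).take 1 = [cs[i]] := rfl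
        have hd1 : ([cs[i]] : List Char).drop 1 = [] := rfl
        rw [ht2, if_neg hnd, ht1, hd1, tokenizeB_nil, List.map_cons, List.map_nil,
            hlast, lookup_single _ hsingle]
      · have hle' : cs.length ≤ i := by omega
        rw [dif_neg h, if_neg h2, List.drop_of_length_le hle', tokenizeB_nil]
        simp

-- ===== VERDICT (by name: the statement is the Claim_ definition above) =====
theorem solve_spec : Claim_equal_solve := by
  intro s _ hpre
  have hv : ∀ c ∈ s.toList, c ∈ validSingles := by
    intro c hc
    have := List.all_eq_true.mp hpre c hc
    simpa using this
  unfold Spec_solve solve solve_alt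
  rw [loop_eq_tokens s.toList hv 0 []]
  simp
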